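-- pv_equiv track=rewrite | github.com/freeeebie/2017-Google-Code-Jam | Qualification_Round/Qualification_C/stall_fileio.py | solve
-- ===== SOURCE A (Python) =====
-- import heapq
--
-- def solve(n, m, case):
--     n = int(n)
--     m = int(m)
--     if n == m:
--         output = 'Case #%d: %d %d\n' % (case, 0, 0)
--         return output
--
--     start = 0
--     end = n - 1
--
--     q = []
--     heapq.heappush(q, (-(end - start), (start, end)))  # uses max heap, So uses negative values
--     y1 = 0
--     z1 = 0
--
--     for i in range(0, m):
--         if len(q) == 0:
--             y1 = 0
--             z1 = 0
--             break
--
--         (distance, (start, end)) = heapq.heappop(q)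
--
--         if end - start <= 0:
--             y1 = 0
--             z1 = 0
--             continue
--
--         middle = start + int((end - start) / 2)
--         y1 = end - middle
--         z1 = middle - start
--         heapq.heappush(q, (-(middle - 1 - start), (start, middle - 1)))
--         heapq.heappush(q, (-(end - (middle + 1)), (middle + 1, end)))
--
--     if y1 > z1:
--         output = 'Case #%d: %d %d\n' % (case, y1, z1)
--     else:
--         output = 'Case #%d: %d %d\n' % (case, z1, y1)
--     return output
-- ===== SOURCE B (Python) =====
-- def solve(n, m, case):
--     # Level-by-level batch processing: segments at each heap level have at most
--     # two gap sizes (v and v-1); track only their counts instead of a heap.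
--     n = int(n)
--     m = int(m)
--     y = z = 0
--     k, a, b, v = m, 1, 0, n - 1
--     while k >= 1 and v >= 1:
--         if k <= a:
--             y, z = v - v // 2, v // 2
--             break
--         if k <= a + b:
--             w = v - 1
--             if w >= 1:
--                 y, z = w - w // 2, w // 2
--             break
--         k -= a + b
--         if v % 2 == 0:
--             a, b, v = 2 * a + b, b, v // 2 - 1
--         else:
--             a, b, v = a, a + 2 * b, v // 2
--     return 'Case #%d: %d %d\n' % (case, y, z)
-- ===== Notes on version B (the rewrite author's own statement) =====
-- stated objective: faster
-- what changed: A simulates all m splits one by one on a heap of segments; B exploits that the segments at each heap level have at most two gap sizes (v and v-1) and processes whole levels at once, keeping only the two counts, so the loop runs O(log n) times instead of m heap operations.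
import Mathlib
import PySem

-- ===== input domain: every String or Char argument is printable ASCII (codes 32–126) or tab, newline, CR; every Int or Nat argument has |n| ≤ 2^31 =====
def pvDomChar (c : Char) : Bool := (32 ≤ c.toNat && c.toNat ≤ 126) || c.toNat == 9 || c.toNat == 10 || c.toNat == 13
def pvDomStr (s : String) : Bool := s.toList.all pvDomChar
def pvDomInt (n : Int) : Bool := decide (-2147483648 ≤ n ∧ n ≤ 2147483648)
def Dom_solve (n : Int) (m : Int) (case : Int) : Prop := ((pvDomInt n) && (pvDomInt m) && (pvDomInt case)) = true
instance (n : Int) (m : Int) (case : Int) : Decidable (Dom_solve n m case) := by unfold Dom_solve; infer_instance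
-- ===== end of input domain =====

-- B replaces A's heap simulation of m pops by level-batch counting (segments at
-- each level have at most two gap sizes), which a timing run measures as faster.

-- ===== PORT A =====
-- 'Case #%d: %d %d\n' % (case, y, z)
def pyFmt (case y z : Int) : String :=
  "Case #" ++ PySem.Int.toStr case ++ ": " ++ PySem.Int.toStr y ++ " " ++ PySem.Int.toStr z ++ "\n"

-- Python's lexicographic `<=` on the tuples (key, (s, e)) held in A's heap.
def tLe (x y : Int × Int × Int) : Bool :=
  decide (x.1 < y.1) ||
    (decide (x.1 = y.1) &&
      (decide (x.2.1 < y.2.1) || (decide (x.2.1 = y.2.1) && decide (x.2.2 ≤ y.2.2))))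

-- heapq.heappop: returns the tuple-minimal element and the remaining heap.
-- heapq's internal array layout is not observable through heappush/heappop; extracting
-- the minimum from the list of elements is exactly heappop's observable behaviour.
def popMin : (Int × Int × Int) → List (Int × Int × Int) → (Int × Int × Int) × List (Int × Int × Int)
  | x, [] => (x, [])
  | x, y :: r =>
    let pr := popMin y r
    if tLe x pr.1 then (x, y :: r) else (pr.1, x :: pr.2)

-- the body of A's `for i in range(0, m)` loop; state (q, y1, z1); fuel = remaining iterations.
-- In the split branch e - s ≥ 1, so Python's int((e-s)/2) is exactly (e-s)/2 (all Int division
-- conventions agree on nonnegative operands); heappush is consing onto the element list.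
def loopA : Nat → List (Int × Int × Int) → Int → Int → Int × Int
  | 0, _, y1, z1 => (y1, z1)
  | _ + 1, [], _, _ => (0, 0)
  | f + 1, t :: ts, _, _ =>
    let pr := popMin t ts
    let s := pr.1.2.1
    let e := pr.1.2.2
    if e - s ≤ 0 then loopA f pr.2 0 0
    else
      let middle := s + (e - s) / 2
      loopA f ((-(middle - 1 - s), s, middle - 1) :: (-(e - (middle + 1)), middle + 1, e) :: pr.2)
        (e - middle) (middle - s)

def solve (n : Int) (m : Int) (case : Int) : String :=
  if n = m then pyFmt case 0 0
  else
    let r := loopA m.toNat [(-(n - 1 - 0), 0, n - 1)] 0 0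
    if r.2 < r.1 then pyFmt case r.1 r.2 else pyFmt case r.2 r.1

-- ===== PORT B =====
-- B's while loop: state (k, a, b, v) = (people left, #segments of gap v, #segments of
-- gap v-1, larger gap at the current level); terminates because v shrinks each level.
def loopB (k a b v : Int) : Int × Int :=
  if h : 1 ≤ k ∧ 1 ≤ v then
    if k ≤ a then (v - PySem.Int.floordiv v 2, PySem.Int.floordiv v 2)
    else if k ≤ a + b then
      if 1 ≤ v - 1 then ((v - 1) - PySem.Int.floordiv (v - 1) 2, PySem.Int.floordiv (v - 1) 2)
      else (0, 0)
    else
      if PySem.Int.mod v 2 = 0 then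
        loopB (k - (a + b)) (2 * a + b) b (PySem.Int.floordiv v 2 - 1)
      else
        loopB (k - (a + b)) a (a + 2 * b) (PySem.Int.floordiv v 2)
  else (0, 0)
termination_by v.toNat
decreasing_by
  · have : PySem.Int.floordiv v 2 = v / 2 := PySem.Int.floordiv_eq_ediv_of_pos (by omega)
    rw [this]; omega
  · have : PySem.Int.floordiv v 2 = v / 2 := PySem.Int.floordiv_eq_ediv_of_pos (by omega)
    rw [this]; omega

def solve_alt (n : Int) (m : Int) (case : Int) : String :=
  let r := loopB m 1 0 (n - 1)
  pyFmt case r.1 r.2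

-- ===== PRECONDITION & SPEC =====
def Spec_solve (n : Int) (m : Int) (case : Int) (out : String) : Prop := out = solve_alt n m case
instance (n : Int) (m : Int) (case : Int) (out : String) : Decidable (Spec_solve n m case out) := by unfold Spec_solve; infer_instance

-- ===== CLAIM (what is proved, stated in full; the proofs are below) =====
def Claim_equal_solve : Prop := ∀ (n : Int) (m : Int) (case : Int), Dom_solve n m case → Spec_solve n m case (solve n m case)

-- ===== LEMMAS AND PROOFS =====

-- gap size of a heap element (key, s, e)
def segVal (t : Int × Int × Int) : Int := t.2.2 - t.2.1

-- invariant of A's heap: every key is the negated gap size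
def KI (q : List (Int × Int × Int)) : Prop := ∀ t ∈ q, t.1 = -(segVal t)

-- the multiset of gap sizes in the heap
def vproj (q : List (Int × Int × Int)) : Multiset Int := (q.map segVal : List Int)

theorem tLe_refl (x : Int × Int × Int) : tLe x x = true := by
  obtain ⟨a, b, c⟩ := x
  simp [tLe]

theorem tLe_total (x y : Int × Int × Int) (h : ¬ tLe x y = true) : tLe y x = true := by
  obtain ⟨a, b, c⟩ := x; obtain ⟨d, e, f⟩ := y
  simp [tLe] at *; omega

theorem tLe_trans {x y z : Int × Int × Int} (h1 : tLe x y = true) (h2 : tLe y z = true) :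
    tLe x z = true := by
  obtain ⟨a, b, c⟩ := x; obtain ⟨d, e, f⟩ := y; obtain ⟨g, i, j⟩ := z
  simp [tLe] at *; omega

theorem popMin_perm (x : Int × Int × Int) (xs : List (Int × Int × Int)) :
    (x :: xs).Perm ((popMin x xs).1 :: (popMin x xs).2) := by
  induction xs generalizing x with
  | nil => simp [popMin]
  | cons y r ih =>
    simp only [popMin]
    by_cases h : tLe x (popMin y r).1 = true
    · simp [h]
    · simp only [h]
      exact (List.Perm.cons x (ih y)).trans (List.Perm.swap _ _ _)

theorem popMin_min (x : Int × Int × Int) (xs : List (Int × Int × Int)) :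
    ∀ y ∈ x :: xs, tLe (popMin x xs).1 y = true := by
  induction xs generalizing x with
  | nil =>
    intro z hz
    simp only [popMin]
    simp at hz
    subst hz; exact tLe_refl z
  | cons y r ih =>
    intro z hz
    simp only [popMin]
    by_cases h : tLe x (popMin y r).1 = true
    · simp only [h, if_true]
      rcases List.mem_cons.mp hz with rfl | hz'
      · exact tLe_refl z
      · exact tLe_trans h (ih y z hz')
    · simp only [h]
      rcases List.mem_cons.mp hz with rfl | hz'
      · exact tLe_total _ _ h
      · exact ih y z hz'

theorem vproj_pop (t : Int × Int × Int) (ts : List (Int × Int × Int)) :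
    vproj (t :: ts) = segVal (popMin t ts).1 ::ₘ vproj (popMin t ts).2 := by
  have h := (popMin_perm t ts).map segVal
  simpa [vproj, Multiset.coe_eq_coe] using Multiset.coe_eq_coe.mpr h

theorem KI_pop {t : Int × Int × Int} {ts : List (Int × Int × Int)} (h : KI (t :: ts)) :
    (popMin t ts).1.1 = -(segVal (popMin t ts).1) ∧ KI (popMin t ts).2 := by
  have hperm := popMin_perm t ts
  constructor
  · exact h _ (hperm.symm.subset (List.mem_cons_self ..))
  · intro u hu
    exact h _ (hperm.symm.subset (List.mem_cons_of_mem _ hu))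

-- the popped element's gap size is the maximum gap size in the heap
theorem pop_val_max {t : Int × Int × Int} {ts : List (Int × Int × Int)} {v : Int}
    (hKI : KI (t :: ts)) (hmem : v ∈ vproj (t :: ts)) (hub : ∀ x ∈ vproj (t :: ts), x ≤ v) :
    segVal (popMin t ts).1 = v := by
  have hmem' : v ∈ (t :: ts).map segVal := by simpa [vproj] using hmem
  obtain ⟨t0, ht0, hval⟩ := List.mem_map.mp hmem'
  have hp_mem : (popMin t ts).1 ∈ t :: ts := (popMin_perm t ts).symm.subset (List.mem_cons_self ..)
  have hub' : segVal (popMin t ts).1 ≤ v :=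
    hub _ (by simpa [vproj] using List.mem_map_of_mem (f := segVal) hp_mem)
  have hle := popMin_min t ts t0 ht0
  have hk1 := hKI _ hp_mem
  have hk2 := hKI _ ht0
  have : (popMin t ts).1.1 ≤ t0.1 := by
    simp only [tLe, Bool.or_eq_true, Bool.and_eq_true, decide_eq_true_eq] at hle; omega
  omega

-- y1/z1 are dead state whenever at least one iteration remains
theorem loopA_yz {f : Nat} (hf : 1 ≤ f) (q : List (Int × Int × Int)) (y z y' z' : Int) :
    loopA f q y z = loopA f q y' z' := by
  cases f with
  | zero => omega
  | succ f' =>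
    cases q with
    | nil => rfl
    | cons t ts => simp only [loopA]

-- once every gap size is ≤ 0, every further iteration yields (0, 0)
theorem loopA_junk : ∀ (f : Nat) (q : List (Int × Int × Int)) (y z : Int), 1 ≤ f → KI q →
    (∀ x ∈ vproj q, x ≤ 0) → loopA f q y z = (0, 0) := by
  intro f
  induction f with
  | zero => intro q y z h; omega
  | succ f ih =>
    intro q y z _ hKI hub
    cases q with
    | nil => simp [loopA]
    | cons t ts =>
      have hpv : segVal (popMin t ts).1 ≤ 0 :=
        hub _ (by rw [vproj_pop]; exact Multiset.mem_cons_self ..)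
      simp only [loopA]
      rw [if_pos (show (popMin t ts).1.2.2 - (popMin t ts).1.2.1 ≤ 0 from hpv)]
      cases f with
      | zero => simp [loopA]
      | succ f' =>
        apply ih _ _ _ (by omega) (KI_pop hKI).2
        intro x hx
        apply hub
        rw [vproj_pop]
        exact Multiset.mem_cons_of_mem hx

-- one iteration of loopA popping an element of gap size v ≥ 1
theorem loopA_step (t : Int × Int × Int) (ts : List (Int × Int × Int)) (f : Nat)
    (hKI : KI (t :: ts)) (v : Int) (hval : segVal (popMin t ts).1 = v) (hv : 1 ≤ v) :
    ∃ q2, KI q2 ∧ vproj q2 = (v / 2 - 1) ::ₘ (v - v / 2 - 1) ::ₘ vproj (popMin t ts).2 ∧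
      loopA (f + 1) (t :: ts) 0 0 = loopA f q2 (v - v / 2) (v / 2) := by
  have hK := KI_pop hKI
  simp only [segVal] at hval
  simp only [loopA]
  rw [if_neg (by omega)]
  set s0 := (popMin t ts).1.2.1 with hs0
  set e0 := (popMin t ts).1.2.2 with he0
  refine ⟨(-(s0 + (e0 - s0) / 2 - 1 - s0), s0, s0 + (e0 - s0) / 2 - 1) ::
    (-(e0 - (s0 + (e0 - s0) / 2 + 1)), s0 + (e0 - s0) / 2 + 1, e0) :: (popMin t ts).2,
    ?_, ?_, ?_⟩
  · intro u hu
    rcases List.mem_cons.mp hu with rfl | hu'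
    · simp [segVal]
    · rcases List.mem_cons.mp hu' with rfl | hu''
      · simp [segVal]
      · exact hK.2 _ hu''
  · show Multiset.ofList (List.map segVal _) = _
    simp only [List.map_cons]
    have h1 : segVal (-(s0 + (e0 - s0) / 2 - 1 - s0), s0, s0 + (e0 - s0) / 2 - 1) = v / 2 - 1 := by
      simp only [segVal]; omega
    have h2 : segVal (-(e0 - (s0 + (e0 - s0) / 2 + 1)), s0 + (e0 - s0) / 2 + 1, e0)
        = v - v / 2 - 1 := by
      simp only [segVal]; omega
    rw [h1, h2]; rfl
  · have h3 : e0 - (s0 + (e0 - s0) / 2) = v - v / 2 := by omega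
    have h4 : s0 + (e0 - s0) / 2 - s0 = v / 2 := by omega
    rw [h3, h4]

-- popping one band of a identical maximal gaps v
theorem popBand (v : Int) (hv : 1 ≤ v) :
    ∀ (f : Nat) (a : Nat) (S : Multiset Int) (q : List (Int × Int × Int)),
    KI q → vproj q = Multiset.replicate a v + S → (∀ x ∈ S, x ≤ v - 1) →
    ((1 ≤ f → f ≤ a → loopA f q 0 0 = (v - v / 2, v / 2)) ∧
     (a < f → ∃ q', KI q' ∧
        vproj q' = S + Multiset.replicate a (v / 2 - 1) + Multiset.replicate a (v - v / 2 - 1) ∧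
        loopA f q 0 0 = loopA (f - a) q' 0 0)) := by
  intro f
  induction f with
  | zero =>
    intro a S q _ _ _
    exact ⟨fun h => by omega, fun h => by omega⟩
  | succ f ih =>
    intro a S q hKI hproj hS
    cases a with
    | zero =>
      refine ⟨fun h1 h2 => by omega, fun _ => ⟨q, hKI, ?_, rfl⟩⟩
      simpa using hproj
    | succ a' =>
      cases q with
      | nil =>
        exfalso
        have hc := congrArg Multiset.card hproj
        simp [vproj] at hc
      | cons t ts =>
        have hub : ∀ x ∈ vproj (t :: ts), x ≤ v := by
          rw [hproj]; intro x hx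
          rcases Multiset.mem_add.mp hx with hx | hx
          · rw [(Multiset.eq_of_mem_replicate hx)]
          · have := hS x hx; omega
        have hmem : v ∈ vproj (t :: ts) := by
          rw [hproj]
          exact Multiset.mem_add.mpr (Or.inl (Multiset.mem_replicate.mpr ⟨by omega, rfl⟩))
        have hval : segVal (popMin t ts).1 = v := pop_val_max hKI hmem hub
        have hq' : vproj (popMin t ts).2 = Multiset.replicate a' v + S := by
          have h1 := vproj_pop t ts
          rw [hval, hproj, Multiset.replicate_succ, Multiset.cons_add] at h1
          exact (Multiset.cons_inj_right v).mp h1.symm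
        obtain ⟨q2, hKI2, hproj2, hstep⟩ := loopA_step t ts f hKI v hval hv
        rw [hq'] at hproj2
        have hproj2' : vproj q2 =
            Multiset.replicate a' v + ((v / 2 - 1) ::ₘ (v - v / 2 - 1) ::ₘ S) := by
          rw [hproj2, Multiset.add_cons, Multiset.add_cons]
        have hS' : ∀ x ∈ (v / 2 - 1) ::ₘ (v - v / 2 - 1) ::ₘ S, x ≤ v - 1 := by
          intro x hx
          rcases Multiset.mem_cons.mp hx with rfl | hx
          · omega
          · rcases Multiset.mem_cons.mp hx with rfl | hx
            · omega
            · exact hS x hx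
        cases f with
        | zero =>
          constructor
          · intro _ _
            rw [hstep]
            simp [loopA]
          · intro h; omega
        | succ f' =>
          obtain ⟨IH1, IH2⟩ := ih a' _ q2 hKI2 hproj2' hS'
          have hyz : loopA (f' + 1) q2 (v - v / 2) (v / 2) = loopA (f' + 1) q2 0 0 :=
            loopA_yz (by omega) q2 _ _ _ _
          constructor
          · intro _ hfa
            rw [hstep, hyz]
            exact IH1 (by omega) (by omega)
          · intro hlt
            obtain ⟨q3, hKI3, hproj3, hrec⟩ := IH2 (by omega)
            refine ⟨q3, hKI3, ?_, ?_⟩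
            · rw [hproj3]
              simp only [Multiset.replicate_succ, ← Multiset.singleton_add]
              abel
            · rw [hstep, hyz, hrec]
              congr 1
              omega

-- main simulation lemma: A's heap loop on a two-band heap equals B's batch loop
theorem mainLoop : ∀ (N : Nat) (v : Int) (a b : Nat) (f : Nat) (q : List (Int × Int × Int)),
    v.toNat ≤ N → 1 ≤ v → 1 ≤ a → 1 ≤ f → KI q →
    vproj q = Multiset.replicate a v + Multiset.replicate b (v - 1) →
    loopA f q 0 0 = loopB (f : Int) (a : Int) (b : Int) v := by
  intro N
  induction N with
  | zero => intro v a b f q hN hv _ _ _ _; omega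
  | succ N ih =>
    intro v a b f q hN hv ha hf hKI hproj
    have hfd : PySem.Int.floordiv v 2 = v / 2 := PySem.Int.floordiv_eq_ediv_of_pos (by omega)
    have hk1 : (1 : Int) ≤ (f : Int) := by exact_mod_cast hf
    obtain ⟨PB1, PB2⟩ := popBand v hv f a _ q hKI hproj
      (fun x hx => by rw [Multiset.eq_of_mem_replicate hx])
    rw [loopB, dif_pos ⟨hk1, hv⟩]
    by_cases hfa : f ≤ a
    · rw [if_pos (show (f : Int) ≤ (a : Int) by exact_mod_cast hfa), hfd]
      exact PB1 hf hfa
    · rw [if_neg (show ¬ (f : Int) ≤ (a : Int) by exact_mod_cast hfa)]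
      obtain ⟨q1, hKI1, hproj1, hrec1⟩ := PB2 (by omega)
      by_cases hv1 : v = 1
      · -- one level left: every remaining pop yields (0, 0) on both sides
        subst hv1
        have hjunk : loopA (f - a) q1 0 0 = (0, 0) := by
          apply loopA_junk _ _ _ _ (by omega) hKI1
          rw [hproj1]; intro x hx
          simp only [Multiset.mem_add, Multiset.mem_replicate] at hx
          omega
        rw [hrec1, hjunk]
        by_cases hfab : (f : Int) ≤ (a : Int) + (b : Int)
        · rw [if_pos hfab, if_neg (by omega)]
        · rw [if_neg hfab, if_neg (by decide), loopB, dif_neg (by rw [hfd]; omega)]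
      · have hv2 : 2 ≤ v := by omega
        have hfd1 : PySem.Int.floordiv (v - 1) 2 = (v - 1) / 2 :=
          PySem.Int.floordiv_eq_ediv_of_pos (by omega)
        obtain ⟨PB1', PB2'⟩ := popBand (v - 1) (by omega) (f - a) b
          (Multiset.replicate a (v / 2 - 1) + Multiset.replicate a (v - v / 2 - 1)) q1 hKI1
          (by rw [hproj1, add_assoc])
          (by intro x hx
              simp only [Multiset.mem_add, Multiset.mem_replicate] at hx
              omega)
        by_cases hfab : f ≤ a + b
        · rw [if_pos (show (f : Int) ≤ (a : Int) + (b : Int) by exact_mod_cast hfab),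
            if_pos (show (1 : Int) ≤ v - 1 by omega), hfd1, hrec1]
          exact PB1' (by omega) (by omega)
        · rw [if_neg (show ¬ (f : Int) ≤ (a : Int) + (b : Int) by exact_mod_cast hfab)]
          obtain ⟨q2, hKI2, hproj2, hrec2⟩ := PB2' (by omega)
          have hk' : (f : Int) - ((a : Int) + (b : Int)) = ((f - a - b : Nat) : Int) := by
            omega
          by_cases hpar : PySem.Int.mod v 2 = 0
          · have hmod : v % 2 = 0 := by
              rw [PySem.Int.mod_eq_emod_of_pos (by omega)] at hpar; exact hpar
            rw [if_pos hpar, hfd]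
            have hproj2' : vproj q2 =
                Multiset.replicate (2 * a + b) (v / 2 - 1)
                  + Multiset.replicate b (v / 2 - 1 - 1) := by
              rw [hproj2]
              have e1 : v - v / 2 - 1 = v / 2 - 1 := by omega
              have e2 : (v - 1) / 2 - 1 = v / 2 - 1 - 1 := by omega
              have e3 : v - 1 - (v - 1) / 2 - 1 = v / 2 - 1 := by omega
              rw [e1, e2, e3, show 2 * a + b = a + a + b by omega,
                Multiset.replicate_add, Multiset.replicate_add]
              abel
            by_cases hv' : 1 ≤ v / 2 - 1
            · have hIH := ih (v / 2 - 1) (2 * a + b) b (f - a - b) q2 (by omega) hv'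
                (by omega) (by omega) hKI2 hproj2'
              rw [hrec1, hrec2, hIH, hk',
                show 2 * (a : Int) + (b : Int) = ((2 * a + b : Nat) : Int) by push_cast; ring]
            · -- the next level's gaps are all ≤ 0
              have hjunk : loopA (f - a - b) q2 0 0 = (0, 0) := by
                apply loopA_junk _ _ _ _ (by omega) hKI2
                rw [hproj2']; intro x hx
                simp only [Multiset.mem_add, Multiset.mem_replicate] at hx
                omega
              rw [hrec1, hrec2, hjunk, loopB, dif_neg (by omega)]
          · have hmod : v % 2 = 1 := by
              rw [PySem.Int.mod_eq_emod_of_pos (by omega)] at hpar; omega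
            rw [if_neg hpar, hfd]
            have hproj2' : vproj q2 =
                Multiset.replicate a (v / 2) + Multiset.replicate (a + 2 * b) (v / 2 - 1) := by
              rw [hproj2]
              have e1 : v - v / 2 - 1 = v / 2 := by omega
              have e2 : (v - 1) / 2 - 1 = v / 2 - 1 := by omega
              have e3 : v - 1 - (v - 1) / 2 - 1 = v / 2 - 1 := by omega
              rw [e1, e2, e3, show a + 2 * b = a + (b + b) by omega,
                Multiset.replicate_add, Multiset.replicate_add]
              abel
            have hIH := ih (v / 2) a (a + 2 * b) (f - a - b) q2 (by omega) (by omega)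
              (by omega) (by omega) hKI2 hproj2'
            rw [hrec1, hrec2, hIH, hk',
              show (a : Int) + 2 * (b : Int) = ((a + 2 * b : Nat) : Int) by push_cast; ring]

-- B's loop returns (0, 0) when k equals the total capacity a(v+1) + bv (the n = m case)
theorem loopB_zero : ∀ (N : Nat) (v k a b : Int), v.toNat ≤ N → 1 ≤ a → 0 ≤ b →
    k = a * (v + 1) + b * v → loopB k a b v = (0, 0) := by
  intro N
  induction N with
  | zero => intro v k a b hN _ _ _; rw [loopB, dif_neg (by omega)]
  | succ N ih =>
    intro v k a b hN ha hb hk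
    by_cases hv : 1 ≤ v
    · have hfd : PySem.Int.floordiv v 2 = v / 2 := PySem.Int.floordiv_eq_ediv_of_pos (by omega)
      have h1 : 0 ≤ a * (v - 1) := mul_nonneg (by omega) (by omega)
      have h2 : 0 ≤ b * (v - 1) := mul_nonneg (by omega) (by omega)
      have he : a * (v + 1) + b * v = a * (v - 1) + b * (v - 1) + 2 * a + b := by ring
      rw [loopB, dif_pos ⟨by omega, hv⟩, if_neg (by omega), if_neg (by omega)]
      have ht : v = 2 * (v / 2) + v % 2 := by omega
      by_cases hpar : PySem.Int.mod v 2 = 0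
      · have hmod : v % 2 = 0 := by
          rw [PySem.Int.mod_eq_emod_of_pos (by omega)] at hpar; exact hpar
        rw [if_pos hpar, hfd]
        apply ih _ _ _ _ (by omega) (by omega) hb
        rw [hk]
        have ht2 : v = 2 * (v / 2) := by omega
        linear_combination (a + b) * ht2
      · have hmod : v % 2 = 1 := by
          rw [PySem.Int.mod_eq_emod_of_pos (by omega)] at hpar; omega
        rw [if_neg hpar, hfd]
        apply ih _ _ _ _ (by omega) ha (by omega)
        rw [hk]
        have ht2 : v = 2 * (v / 2) + 1 := by omega
        linear_combination (a + b) * ht2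
    · rw [loopB, dif_neg (by omega)]

theorem loopB_ord : ∀ (N : Nat) (k a b v : Int), v.toNat ≤ N →
    (loopB k a b v).2 ≤ (loopB k a b v).1 := by
  intro N
  induction N with
  | zero => intro k a b v hN; rw [loopB, dif_neg (by omega)]
  | succ N ih =>
    intro k a b v hN
    by_cases hc : 1 ≤ k ∧ 1 ≤ v
    · have hfd : PySem.Int.floordiv v 2 = v / 2 :=
        PySem.Int.floordiv_eq_ediv_of_pos (by omega)
      rw [loopB, dif_pos hc]
      by_cases h1 : k ≤ a
      · rw [if_pos h1, hfd]; simp; omega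
      · rw [if_neg h1]
        by_cases h2 : k ≤ a + b
        · rw [if_pos h2]
          by_cases h3 : (1 : Int) ≤ v - 1
          · rw [if_pos h3, PySem.Int.floordiv_eq_ediv_of_pos (by omega)]; simp; omega
          · rw [if_neg h3]
        · rw [if_neg h2]
          by_cases hpar : PySem.Int.mod v 2 = 0
          · rw [if_pos hpar, hfd]; exact ih _ _ _ _ (by omega)
          · rw [if_neg hpar, hfd]; exact ih _ _ _ _ (by omega)
    · rw [loopB, dif_neg hc]

-- ===== VERDICT (by name: the statement is the Claim_ definition above) =====
theorem solve_spec : Claim_equal_solve := by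
  unfold Claim_equal_solve Spec_solve
  intro n m case _
  by_cases hnm : n = m
  · subst hnm
    have hz : loopB n 1 0 (n - 1) = (0, 0) :=
      loopB_zero (n - 1).toNat (n - 1) n 1 0 (le_refl _) (by omega) (by omega) (by ring)
    simp [solve, solve_alt, hz]
  · simp only [solve, solve_alt, if_neg hnm]
    by_cases hm : m ≤ 0
    · have h0 : m.toNat = 0 := by omega
      rw [h0, loopB, dif_neg (by omega)]
      rfl
    · by_cases hn : n - 1 ≤ 0
      · have hA : loopA m.toNat [(-(n - 1 - 0), 0, n - 1)] 0 0 = (0, 0) := by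
          apply loopA_junk _ _ _ _ (by omega)
          · intro t ht
            simp only [List.mem_singleton] at ht
            subst ht; rfl
          · intro x hx
            simp only [vproj, List.map_cons, List.map_nil, segVal] at hx
            simp at hx
            omega
        rw [hA, loopB, dif_neg (by omega)]
        rfl
      · have hq : vproj [((-(n - 1 - 0) : Int), (0 : Int), n - 1)] =
            Multiset.replicate 1 (n - 1) + Multiset.replicate 0 (n - 1 - 1) := by
          simp only [vproj, List.map_cons, List.map_nil, segVal]
          simp
        have hAB := mainLoop (n - 1).toNat (n - 1) 1 0 m.toNat
          [(-(n - 1 - 0), 0, n - 1)] (le_refl _) (by omega) (by omega) (by omega)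
          (by intro t ht
              simp only [List.mem_singleton] at ht
              subst ht; rfl)
          hq
        rw [Int.toNat_of_nonneg (by omega)] at hAB
        simp only [Nat.cast_one, Nat.cast_zero] at hAB
        rw [hAB]
        have hord := loopB_ord (n - 1).toNat m 1 0 (n - 1) (le_refl _)
        by_cases hlt : (loopB m 1 0 (n - 1)).2 < (loopB m 1 0 (n - 1)).1
        · rw [if_pos hlt]
        · rw [if_neg hlt]
          have he : (loopB m 1 0 (n - 1)).1 = (loopB m 1 0 (n - 1)).2 := by omega
          rw [he]
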